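-- pv_equiv track=rewrite | github.com/paiml/depyler | examples/hard_prac_mem_gc.py | gc_compact
-- ===== SOURCE A (Python) =====
-- def gc_compact(objects: list[int], reachable: list[int],
--                num_objects: int) -> int:
--     """Compact: slide live objects to front. Returns new count of live objects."""
--     write: int = 0
--     read: int = 0
--     while read < num_objects:
--         r: int = reachable[read]
--         if r == 1:
--             obj_val: int = objects[read]
--             objects[write] = obj_val
--             write = write + 1
--         read = read + 1
--     clear: int = write
--     while clear < num_objects:
--         objects[clear] = 0
--         clear = clear + 1
--     return write
-- ===== SOURCE B (Python) =====
-- def gc_compact(objects: list[int], reachable: list[int],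
--                num_objects: int) -> int:
--     """Deletion-based compaction: copy the managed prefix, delete dead slots
--     back-to-front (so pending indices stay valid), then write the compacted
--     copy back padded with zeros."""
--     buf = [objects[i] for i in range(num_objects)]
--     i = num_objects - 1
--     while i >= 0:
--         if reachable[i] != 1:
--             buf.pop(i)
--         i -= 1
--     live = len(buf)
--     for i in range(num_objects):
--         objects[i] = buf[i] if i < live else 0
--     return live
-- ===== Notes on version B (the rewrite author's own statement) =====
-- stated objective: alternative
-- what changed: Replaces A's forward two-pointer slide (move each live value left, then a clear loop) with a deletion-based scheme: copy the managed prefix, scan it backwards removing dead slots with pop so remaining indices stay valid, then write the shrunken copy back padded with zeros; the result is its length.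
import Mathlib
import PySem

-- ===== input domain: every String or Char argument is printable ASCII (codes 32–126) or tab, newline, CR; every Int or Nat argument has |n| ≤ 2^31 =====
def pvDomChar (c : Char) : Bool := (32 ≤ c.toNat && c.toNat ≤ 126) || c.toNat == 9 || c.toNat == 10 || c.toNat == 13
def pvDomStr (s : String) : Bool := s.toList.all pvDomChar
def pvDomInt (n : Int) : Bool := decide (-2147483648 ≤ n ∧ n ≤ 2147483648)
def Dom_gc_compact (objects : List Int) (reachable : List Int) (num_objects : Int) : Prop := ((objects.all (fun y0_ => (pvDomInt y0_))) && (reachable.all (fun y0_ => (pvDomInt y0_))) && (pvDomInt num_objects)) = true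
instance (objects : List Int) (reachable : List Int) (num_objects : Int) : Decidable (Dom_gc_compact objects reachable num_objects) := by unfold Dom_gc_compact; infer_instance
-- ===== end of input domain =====

-- B replaces A's forward two-pointer slide with deletion: copy the managed prefix, remove dead
-- slots back-to-front with pop, write the copy back zero-padded; alternative algorithm, same cost class.
-- Both A and B mutate `objects` in place (identically on Pre_); the equivalence proved here is
-- about the RETURN value only (the ports carry the mutated list but discard it).


-- ===== PORT A =====
-- the read/write slide loop; fuel = remaining iterations ((n-read).toNat at the call).
-- `.getD 0` on pyGet?/pySetD is exact under Pre_ (every index accessed is in range there).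
def gcReadLoop (reach : List Int) (n : Int) (fuel : Nat) (objs : List Int)
    (read write : Int) : List Int × Int :=
  match fuel with
  | 0 => (objs, write)
  | f+1 =>
    if read < n then
      let r := (PySem.List.pyGet? reach read).getD 0
      if r = 1 then
        let v := (PySem.List.pyGet? objs read).getD 0
        gcReadLoop reach n f (PySem.List.pySetD objs write v) (read+1) (write+1)
      else gcReadLoop reach n f objs (read+1) write
    else (objs, write)

def gcClearLoop (n : Int) (fuel : Nat) (objs : List Int) (clear : Int) : List Int :=
  match fuel with
  | 0 => objs
  | f+1 =>
    if clear < n then gcClearLoop n f (PySem.List.pySetD objs clear 0) (clear+1)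
    else objs

def gc_compact (objects : List Int) (reachable : List Int) (num_objects : Int) : Int :=
  let st := gcReadLoop reachable num_objects num_objects.toNat objects 0 0
  let write := st.2
  let _objs := gcClearLoop num_objects (num_objects - write).toNat st.1 write
  write

-- ===== PORT B =====
-- the backwards `while i >= 0` deletion loop; fuel = remaining iterations (num_objects.toNat).
-- buf.pop(i) succeeds for every processed i under Pre_ (i < current length throughout).
def gcPopLoop (reach : List Int) (fuel : Nat) (buf : List Int) (i : Int) : List Int :=
  match fuel with
  | 0 => buf
  | f+1 =>
    if 0 ≤ i then
      let buf' := if (PySem.List.pyGet? reach i).getD 0 ≠ 1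
                  then ((PySem.List.pop? buf i).map Prod.snd).getD buf
                  else buf
      gcPopLoop reach f buf' (i-1)
    else buf

def gc_compact_alt (objects : List Int) (reachable : List Int) (num_objects : Int) : Int :=
  let buf0 := (PySem.List.pyRange 0 num_objects 1).map
      (fun i => (PySem.List.pyGet? objects i).getD 0)
  let buf := gcPopLoop reachable num_objects.toNat buf0 (num_objects - 1)
  let live := (buf.length : Int)
  let _objs := (PySem.List.pyRange 0 num_objects 1).foldl
      (fun o i => PySem.List.pySetD o i
        (if i < live then (PySem.List.pyGet? buf i).getD 0 else 0)) objects
  live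

-- ===== PRECONDITION & SPEC =====
-- Pre_ excludes exactly the inputs where Python A raises IndexError:
-- num_objects exceeding the length of reachable or of objects.
def Pre_gc_compact (objects : List Int) (reachable : List Int) (num_objects : Int) : Prop :=
  num_objects ≤ (objects.length : Int) ∧ num_objects ≤ (reachable.length : Int)
instance (objects : List Int) (reachable : List Int) (num_objects : Int) : Decidable (Pre_gc_compact objects reachable num_objects) := by unfold Pre_gc_compact; infer_instance
def pvWitness_gc_compact : List Int × List Int × Int := ([5, 0, 7], [1, 0, 1], 3)

def Spec_gc_compact (objects : List Int) (reachable : List Int) (num_objects : Int) (out : Int) : Prop := out = gc_compact_alt objects reachable num_objects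
instance (objects : List Int) (reachable : List Int) (num_objects : Int) (out : Int) : Decidable (Spec_gc_compact objects reachable num_objects out) := by unfold Spec_gc_compact; infer_instance

-- ===== CLAIM (what is proved, stated in full; the proofs are below) =====
def Claim_equal_gc_compact : Prop := ∀ (objects : List Int) (reachable : List Int) (num_objects : Int), Dom_gc_compact objects reachable num_objects → Pre_gc_compact objects reachable num_objects → Spec_gc_compact objects reachable num_objects (gc_compact objects reachable num_objects)

-- ===== LEMMAS AND PROOFS =====

-- A's slide loop returns write + (number of 1-entries of reachable at indices read..n-1);
-- the count is independent of the objects buffer being mutated.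
theorem gcReadLoop_snd (reach : List Int) (n : Int) :
    ∀ (fuel : Nat) (read write : Int) (objs : List Int), (n - read).toNat ≤ fuel →
    (gcReadLoop reach n fuel objs read write).2 =
      write + (((PySem.List.pyRange read n 1).countP
        (fun i => (PySem.List.pyGet? reach i).getD 0 == 1) : Nat) : Int) := by
  intro fuel
  induction fuel with
  | zero =>
    intro read write objs h
    have hn : n ≤ read := by omega
    simp [gcReadLoop, PySem.List.pyRange_one_eq_nil hn]
  | succ f ih =>
    intro read write objs h
    by_cases hr : read < n
    · rw [PySem.List.pyRange_one_cons hr]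
      by_cases h1 : (PySem.List.pyGet? reach read).getD 0 == 1
      · simp only [gcReadLoop, if_pos hr, if_pos (by simpa using h1),
          List.countP_cons, h1]
        rw [ih (read+1) (write+1) _ (by omega)]
        push_cast; ring
      · simp only [gcReadLoop, if_pos hr, if_neg (by simpa using h1),
          List.countP_cons, h1]
        rw [ih (read+1) write _ (by omega)]
        simp
    · have hn : n ≤ read := by omega
      simp [gcReadLoop, if_neg hr, PySem.List.pyRange_one_eq_nil hn]

-- B's deletion loop, started at index k-1 on a buffer of length ≥ k, removes exactly the
-- dead indices of [0, k): the final length is the original minus the dead count.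
theorem gcPopLoop_length (reach : List Int) :
    ∀ (k fuel : Nat) (buf : List Int), k ≤ fuel → k ≤ buf.length →
    (gcPopLoop reach fuel buf ((k : Int) - 1)).length
      + (PySem.List.pyRange 0 k 1).countP
          (fun j => !((PySem.List.pyGet? reach j).getD 0 == 1))
      = buf.length := by
  intro k
  induction k with
  | zero =>
    intro fuel buf _ _
    cases fuel <;> simp [gcPopLoop]
  | succ k ih =>
    intro fuel buf hf hl
    obtain ⟨f, rfl⟩ : ∃ f, fuel = f + 1 := ⟨fuel - 1, by omega⟩
    have hk : ((k : Int) + 1 - 1) = (k : Int) := by ring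
    have hrange : PySem.List.pyRange 0 ((k : Int) + 1) 1
        = PySem.List.pyRange 0 (k : Int) 1 ++ [(k : Int)] :=
      PySem.List.pyRange_one_succ_right (by positivity)
    simp only [Nat.cast_add, Nat.cast_one, hk, hrange, List.countP_append]
    by_cases hd : (PySem.List.pyGet? reach (k : Int)).getD 0 = 1
    · -- live: no pop at index k
      simp only [gcPopLoop, if_pos (by positivity : (0:Int) ≤ (k:Int))]
      rw [if_neg (by simpa using hd)]
      have := ih f buf (by omega) (by omega)
      have hc : List.countP (fun j => !((PySem.List.pyGet? reach j).getD 0 == 1))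
          [(k : Int)] = 0 := by
        have hd' : reach[(k : Nat)]?.getD 0 = 1 := by simpa using hd
        simp [hd']
      omega
    · -- dead: pop index k; it is in range, so pop? succeeds and shrinks by one
      have hkl : (k : Nat) < buf.length := by omega
      have hpop := PySem.List.pop?_natCast (xs := buf) (n := k) hkl
      simp only [gcPopLoop, if_pos (by positivity : (0:Int) ≤ (k:Int))]
      rw [if_pos (by simpa using hd), hpop]
      have hlen : (buf.eraseIdx k).length = buf.length - 1 :=
        List.length_eraseIdx_of_lt hkl
      have := ih f (buf.eraseIdx k) (by omega) (by omega)
      have hc : List.countP (fun j => !((PySem.List.pyGet? reach j).getD 0 == 1))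
          [(k : Int)] = 1 := by
        have hd' : ¬ reach[(k : Nat)]?.getD 0 = 1 := by simpa using hd
        simp [hd']
      simp only [Option.map_some, Option.getD_some]
      omega

-- ===== VERDICT (by name: the statement is the Claim_ definition above) =====
theorem gc_compact_spec : Claim_equal_gc_compact := by
  intro objects reachable num_objects _ _
  unfold Spec_gc_compact gc_compact gc_compact_alt
  simp only []
  rw [gcReadLoop_snd reachable num_objects num_objects.toNat 0 0 objects (by omega)]
  by_cases hn : 0 ≤ num_objects
  · obtain ⟨k, rfl⟩ : ∃ k : Nat, num_objects = (k : Int) := ⟨num_objects.toNat, by omega⟩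
    have hlen : ((PySem.List.pyRange 0 (k : Int) 1).map
        (fun i => (PySem.List.pyGet? objects i).getD 0)).length = k := by
      simp [PySem.List.length_pyRange_one]
    have h := gcPopLoop_length reachable k k
        ((PySem.List.pyRange 0 (k : Int) 1).map
          (fun i => (PySem.List.pyGet? objects i).getD 0)) le_rfl (by omega)
    have hsum := (PySem.List.pyRange 0 (k : Int) 1).length_eq_countP_add_countP
        (fun i => (PySem.List.pyGet? reachable i).getD 0 == 1)
    rw [PySem.List.length_pyRange_one] at hsum
    simp only [decide_not, Bool.decide_eq_true] at hsum
    rw [Int.toNat_natCast]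
    omega
  · have h0 : num_objects.toNat = 0 := by omega
    have hnil : PySem.List.pyRange 0 num_objects 1 = [] :=
      PySem.List.pyRange_one_eq_nil (by omega)
    simp [h0, gcPopLoop, hnil]
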